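-- pv_equiv track=rewrite | github.com/HPYoo/swcodingtest | prob17140.py | calc_R
-- ===== SOURCE A (Python) =====
-- def calc_R(arr):
--     new_arr = []
--     max_row = 0
--     for i in range(len(arr)):
--         temp = arr[i]
--         max_num = max(arr[i])
--         info = {}
--         for j in range(1, max_num+1):
--             if temp.count(j) != 0 :
--                 info[j] = temp.count(j)
--         # info [1] 기준으로 정렬하자
--         size = len(info)
--         temp_list = []
--         num = 1
--         while size:
--             for j in info :
--                 if info[j] == num :
--                     temp_list.append(j)
--                     temp_list.append(num)
--                     size -= 1
--             num += 1
--         max_row = max(max_row, len(temp_list))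
--         new_arr.append(temp_list)
--     for i in range(len(new_arr)):
--         if len(new_arr[i]) < max_row :
--             while True :
--                 new_arr[i].append(0)
--                 if len(new_arr[i]) == max_row : break
--     return new_arr
-- ===== SOURCE B (Python) =====
-- def calc_R(arr):
--     rows = []
--     for temp in arr:
--         cnt = {}
--         for x in temp:
--             if x > 0:
--                 cnt[x] = cnt.get(x, 0) + 1
--         pairs = sorted(cnt.items(), key=lambda kv: (kv[1], kv[0]))
--         flat = []
--         for v, c in pairs:
--             flat.append(v)
--             flat.append(c)
--         rows.append(flat)
--     max_row = max((len(r) for r in rows), default=0)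
--     return [r + [0] * (max_row - len(r)) for r in rows]
-- ===== Notes on version B (the rewrite author's own statement) =====
-- stated objective: simpler
-- what changed: B replaces A's scan of every candidate value in range(1, max(row)+1) with a repeated row.count() call and A's count-by-count dict re-scanning emission loop by a single one-pass counter per row plus one sort of the (value, count) pairs by (count, value), and replaces the append-one-zero-at-a-time padding loop with arithmetic padding.
import Mathlib
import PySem

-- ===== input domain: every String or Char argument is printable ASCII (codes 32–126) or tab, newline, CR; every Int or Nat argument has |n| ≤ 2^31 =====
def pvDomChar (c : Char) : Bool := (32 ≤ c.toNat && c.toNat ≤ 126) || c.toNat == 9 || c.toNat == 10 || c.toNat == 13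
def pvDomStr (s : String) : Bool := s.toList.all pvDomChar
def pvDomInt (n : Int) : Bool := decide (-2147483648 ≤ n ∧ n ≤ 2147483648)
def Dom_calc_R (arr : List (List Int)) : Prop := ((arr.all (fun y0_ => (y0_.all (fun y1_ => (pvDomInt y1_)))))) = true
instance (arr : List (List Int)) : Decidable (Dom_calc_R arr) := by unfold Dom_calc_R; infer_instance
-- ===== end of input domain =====

-- B replaces A's count-scan over range(1, max) and its count-by-count emission loop with a
-- one-pass counter plus a single (count, value) sort; objective: simpler (and faster on rows
-- with large values).


-- ===== PORT A =====
-- A's 'while size: for j in info: ... ; num += 1' loop; the Nat fuel only makes the recursion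
-- total (temp.length + 1 passes always suffice, as the proofs below show).
def pvA_while (info : PySem.Dict Int Int) : Nat → Int → Int → List Int → List Int
  | 0, _, _, temp_list => temp_list
  | fuel + 1, size, num, temp_list =>
    if size ≠ 0 then
      let st := info.keys.foldl
        (fun (st : List Int × Int) j =>
          if info.getD j 0 = num then (st.1 ++ [j, num], st.2 - 1) else st)
        (temp_list, size)
      pvA_while info fuel st.2 (num + 1) st.1
    else temp_list

-- A's inner 'while True: append(0); if len == max_row: break' loop; fuel = number of appends.
def pvA_pad (max_row : Int) : Nat → List Int → List Int
  | 0, r => r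
  | fuel + 1, r =>
    let r' := r ++ [0]
    if (r'.length : Int) = max_row then r' else pvA_pad max_row fuel r'

-- the body of A's main loop: temp_list for one row
def pvA_row (temp : List Int) : List Int :=
  let max_num := (PySem.List.max? temp (fun x => x)).getD 0  -- max(arr[i]); none = ValueError, excluded by Pre_
  let info := (PySem.List.pyRange 1 (max_num + 1)).foldl
    (fun d j =>
      if ((PySem.List.count temp j : Int)) ≠ 0 then d.insert j ((PySem.List.count temp j : Int)) else d)
    PySem.Dict.empty
  pvA_while info (temp.length + 1) (PySem.Dict.size info) 1 []

def calc_R (arr : List (List Int)) : List (List Int) :=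
  let st := arr.foldl
    (fun (st : List (List Int) × Int) temp =>
      let temp_list := pvA_row temp
      (st.1 ++ [temp_list], max st.2 ((temp_list.length : Int))))
    ([], 0)
  st.1.map (fun r => if (r.length : Int) < st.2 then pvA_pad st.2 (st.2 - (r.length : Int)).toNat r else r)

-- ===== PORT B =====
def pvB_row (temp : List Int) : List Int :=
  let cnt := temp.foldl
    (fun (d : PySem.Dict Int Int) x => if 0 < x then d.insert x (d.getD x 0 + 1) else d)
    PySem.Dict.empty
  -- Python's tuple key (kv[1], kv[0]) compares lexicographically = the Lex order on Int × Int (exact)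
  let pairs := PySem.List.sorted cnt.items (fun kv => toLex (kv.2, kv.1))
  pairs.foldl (fun flat kv => flat ++ [kv.1, kv.2]) []

def calc_R_alt (arr : List (List Int)) : List (List Int) :=
  let rows := arr.map pvB_row
  let max_row := PySem.List.maxD (rows.map (fun r => (r.length : Int))) (fun x => x) 0
  rows.map (fun r => r ++ List.replicate (max_row - (r.length : Int)).toNat 0)

-- ===== PRECONDITION & SPEC =====
-- Pre_ excludes inputs containing an empty row, on which A's max(arr[i]) raises ValueError.
def Pre_calc_R (arr : List (List Int)) : Prop := ∀ row ∈ arr, row ≠ []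
instance (arr : List (List Int)) : Decidable (Pre_calc_R arr) := by unfold Pre_calc_R; infer_instance
def pvWitness_calc_R : List (List Int) := [[1, 2, 2], [3]]

def Spec_calc_R (arr : List (List Int)) (out : List (List Int)) : Prop := out = calc_R_alt arr
instance (arr : List (List Int)) (out : List (List Int)) : Decidable (Spec_calc_R arr out) := by unfold Spec_calc_R; infer_instance

-- ===== CLAIM (what is proved, stated in full; the proofs are below) =====
def Claim_equal_calc_R : Prop := ∀ (arr : List (List Int)), Dom_calc_R arr → Pre_calc_R arr → Spec_calc_R arr (calc_R arr)

-- ===== LEMMAS AND PROOFS =====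

-- the multiplicity function both programs are about
def pvCnt (temp : List Int) (j : Int) : Int := ((PySem.List.count temp j : Int))

-- A's dict keys: the positive values present in temp, in increasing order
def pvKeys (temp : List Int) : List Int :=
  (PySem.List.pyRange 1 (((PySem.List.max? temp (fun x => x)).getD 0) + 1)).filter
    (fun j => decide (pvCnt temp j ≠ 0))

-- canonical (value, count) pairs grouped by count = num, num+1, …, num+f-1
def pvBlocks (cnt : Int → Int) (l : List Int) : Nat → Int → List (Int × Int)
  | 0, _ => []
  | f + 1, num =>
    (l.filter (fun j => decide (cnt j = num))).map (fun j => (j, num)) ++ pvBlocks cnt l f (num + 1)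

theorem pvBlocks_mem (cnt : Int → Int) (l : List Int) (f : Nat) (num : Int) (p : Int × Int)
    (hp : p ∈ pvBlocks cnt l f num) : p.1 ∈ l ∧ cnt p.1 = p.2 ∧ num ≤ p.2 := by
  induction f generalizing num with
  | zero => simp [pvBlocks] at hp
  | succ f ih =>
    simp only [pvBlocks, List.mem_append, List.mem_map, List.mem_filter] at hp
    rcases hp with ⟨j, ⟨hj, hc⟩, rfl⟩ | h
    · simp at hc; exact ⟨hj, by simp [hc], le_refl _⟩
    · obtain ⟨h1, h2, h3⟩ := ih (num + 1) h
      exact ⟨h1, h2, by omega⟩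

theorem pvBlocks_congr (cnt : Int → Int) (f : Nat) (num : Int) (l l' : List Int)
    (h : ∀ c : Int, num ≤ c →
      l.filter (fun j => decide (cnt j = c)) = l'.filter (fun j => decide (cnt j = c))) :
    pvBlocks cnt l f num = pvBlocks cnt l' f num := by
  induction f generalizing num with
  | zero => rfl
  | succ f ih =>
    simp only [pvBlocks]
    rw [h num (le_refl _), ih (num + 1) (fun c hc => h c (by omega))]

theorem pvBlocks_perm (cnt : Int → Int) (f : Nat) (num : Int) (l : List Int)
    (h : ∀ j ∈ l, num ≤ cnt j ∧ cnt j < num + f) :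
    (pvBlocks cnt l f num).Perm (l.map (fun j => (j, cnt j))) := by
  induction f generalizing num l with
  | zero =>
    have : l = [] := by
      rw [List.eq_nil_iff_forall_not_mem]
      intro j hj; have := h j hj; omega
    simp [this, pvBlocks]
  | succ f ih =>
    simp only [pvBlocks]
    have hsplit := List.filter_append_perm (fun j => decide (cnt j = num)) l
    set l₁ := l.filter (fun j => decide (cnt j = num)) with hl₁
    set l₂ := l.filter (fun j => !decide (cnt j = num)) with hl₂
    have hrw : pvBlocks cnt l f (num + 1) = pvBlocks cnt l₂ f (num + 1) := by
      apply pvBlocks_congr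
      intro c hc
      rw [hl₂, List.filter_filter]
      apply (List.filter_congr _).symm
      intro j _
      by_cases hcj : cnt j = c
      · simp [hcj]; omega
      · simp [hcj]
    have h₂ : ∀ j ∈ l₂, num + 1 ≤ cnt j ∧ cnt j < (num + 1) + f := by
      intro j hj
      rw [hl₂, List.mem_filter] at hj
      have := h j hj.1
      have : ¬ (cnt j = num) := by simpa using hj.2
      omega
    refine List.Perm.trans (List.Perm.of_eq ?_) (List.Perm.trans (List.Perm.append_left (l₁.map (fun j => (j, cnt j))) (ih (num + 1) l₂ h₂)) ?_)
    · rw [hrw]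
      congr 1
      apply List.map_congr_left
      intro j hj
      rw [hl₁, List.mem_filter] at hj
      have : cnt j = num := by simpa using hj.2
      simp [this]
    · rw [← List.map_append]
      exact List.Perm.map _ hsplit

theorem pvBlocks_pairwise (cnt : Int → Int) (l : List Int) (hl : l.Pairwise (· < ·))
    (f : Nat) (num : Int) :
    (pvBlocks cnt l f num).Pairwise
      (fun a b => toLex ((a.2 : Int), (a.1 : Int)) < toLex (b.2, b.1)) := by
  induction f generalizing num with
  | zero => simp [pvBlocks]
  | succ f ih =>
    simp only [pvBlocks]
    rw [List.pairwise_append]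
    refine ⟨?_, ih (num + 1), ?_⟩
    · rw [List.pairwise_map]
      apply List.Pairwise.imp _ (hl.sublist List.filter_sublist)
      intro a b hab
      rw [Prod.Lex.toLex_lt_toLex]
      right; exact ⟨rfl, hab⟩
    · intro a ha b hb
      rw [List.mem_map] at ha
      obtain ⟨j, _, rfl⟩ := ha
      have hb' := pvBlocks_mem cnt l f (num + 1) b hb
      rw [Prod.Lex.toLex_lt_toLex]
      left; simp only []
      omega

-- flatMap of an ite-block is flatMap over the filter
theorem pvFlatMap_ite (p : Int → Prop) [DecidablePred p] (h : Int → List Int) (l : List Int) :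
    l.flatMap (fun j => if p j then h j else []) =
      (l.filter (fun j => decide (p j))).flatMap h := by
  induction l with
  | nil => rfl
  | cons x t ih =>
    by_cases hx : p x <;> simp [List.flatMap_cons, hx, ih]

-- the decrement loop: size minus the number of matches
theorem pvFoldl_sub_one (p : Int → Prop) [DecidablePred p] (l : List Int) (s : Int) :
    l.foldl (fun s j => if p j then s - 1 else s) s
      = s - (l.countP (fun j => decide (p j)) : Int) := by
  induction l generalizing s with
  | nil => simp
  | cons x t ih =>
    by_cases hx : p x
    · simp [List.foldl_cons, hx, ih]
      omega
    · simp [List.foldl_cons, hx, ih]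

theorem pvCountP_split (cnt : Int → Int) (l : List Int) (num : Int) :
    l.countP (fun j => decide (num ≤ cnt j))
      = l.countP (fun j => decide (cnt j = num)) + l.countP (fun j => decide (num + 1 ≤ cnt j)) := by
  induction l with
  | nil => rfl
  | cons x t ih =>
    simp only [List.countP_cons, ih]
    by_cases h1 : cnt x = num
    · simp [h1]; omega
    · by_cases h2 : num + 1 ≤ cnt x
      · have h4 : num ≤ cnt x := by omega
        simp [h1, h2, h4]
        omega
      · by_cases h3 : num ≤ cnt x
        · omega
        · simp [h1, h2, h3]

theorem pvBlocks_nil (cnt : Int → Int) (l : List Int) (f : Nat) (num : Int)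
    (h : ∀ j ∈ l, ¬ num ≤ cnt j) : pvBlocks cnt l f num = [] := by
  induction f generalizing num with
  | zero => rfl
  | succ f ih =>
    simp only [pvBlocks]
    rw [List.filter_eq_nil_iff.mpr, ih (num + 1) (fun j hj => by have := h j hj; omega)]
    · rfl
    · intro j hj
      have := h j hj
      simp; omega

-- the while loop computes the flattened canonical blocks
theorem pvA_while_eq (info : PySem.Dict Int Int) (keys : List Int) (cnt : Int → Int)
    (hk : info.keys = keys) (hv : ∀ j ∈ keys, info.getD j 0 = cnt j) :
    ∀ (fuel : Nat) (num : Int) (tl : List Int) (size : Int),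
      size = ((keys.countP (fun j => decide (num ≤ cnt j)) : Int)) →
      pvA_while info fuel size num tl
        = tl ++ (pvBlocks cnt keys fuel num).flatMap (fun kv => [kv.1, kv.2]) := by
  intro fuel
  induction fuel with
  | zero => intro num tl size _; simp [pvA_while, pvBlocks]
  | succ fuel ih =>
    intro num tl size hsize
    by_cases hz : size = 0
    · have hnil : ∀ j ∈ keys, ¬ num ≤ cnt j := by
        intro j hj
        subst hz
        have : keys.countP (fun j => decide (num ≤ cnt j)) = 0 := by omega
        rw [List.countP_eq_zero] at this
        simpa using this j hj
      rw [pvA_while]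
      simp only [hz, ne_eq, not_true_eq_false, if_false]
      rw [pvBlocks_nil cnt keys (fuel + 1) num hnil]
      simp
    · rw [pvA_while]
      simp only [hz, ne_eq, not_false_eq_true, if_true]
      rw [hk]
      have hfold :
          keys.foldl (fun (st : List Int × Int) j =>
              if info.getD j 0 = num then (st.1 ++ [j, num], st.2 - 1) else st) (tl, size)
            = (tl ++ (keys.filter (fun j => decide (cnt j = num))).flatMap (fun j => [j, num]),
               size - (keys.countP (fun j => decide (cnt j = num)) : Int)) := by
        rw [PySem.List.foldl_congr_mem keys _
          (fun (st : List Int × Int) j =>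
            ((fun (l : List Int) j => l ++ (if cnt j = num then [j, num] else [])) st.1 j,
             (fun (s : Int) j => if cnt j = num then s - 1 else s) st.2 j)) (tl, size) ?_]
        · rw [PySem.List.foldl_prod_mk
            (fun (l : List Int) j => l ++ (if cnt j = num then [j, num] else []))
            (fun (s : Int) j => if cnt j = num then s - 1 else s) keys tl size]
          congr 1
          · rw [PySem.List.foldl_append_eq_flatMap]
            rw [pvFlatMap_ite (fun j => cnt j = num) (fun j => [j, num]) keys]
          · exact pvFoldl_sub_one _ keys size
        · intro acc x hx
          rw [hv x hx]
          by_cases hc : cnt x = num <;> simp [hc]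
      rw [hfold]
      simp only []
      rw [ih (num + 1) _ _ ?_]
      · simp only [pvBlocks, List.flatMap_append, List.append_assoc]
        congr 2
        rw [List.flatMap_map]
      · rw [hsize, pvCountP_split cnt keys num]
        push_cast
        ring

theorem pvPyRange_pairwise (a b : Int) : (PySem.List.pyRange a b).Pairwise (· < ·) := by
  unfold PySem.List.pyRange
  norm_num
  rw [List.pairwise_map]
  exact (List.pairwise_lt_range).imp (by intro x y h; omega)

-- characterisation of A's info dict
theorem pvInfo_items (temp : List Int) :
    ((PySem.List.pyRange 1 (((PySem.List.max? temp (fun x => x)).getD 0) + 1)).foldl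
      (fun d j =>
        if ((PySem.List.count temp j : Int)) ≠ 0 then d.insert j ((PySem.List.count temp j : Int)) else d)
      PySem.Dict.empty).items
    = (pvKeys temp).map (fun j => (j, pvCnt temp j)) := by
  rw [PySem.List.foldl_ite_eq_foldl_filter
    (fun j => ((PySem.List.count temp j : Int)) ≠ 0)
    (fun (d : PySem.Dict Int Int) j => d.insert j ((PySem.List.count temp j : Int)))]
  rw [PySem.Dict.items_foldl_insert_fresh _ (fun j => j) (fun j => ((PySem.List.count temp j : Int)))
    PySem.Dict.empty (by intro a _; simp [PySem.Dict.contains_empty]) ?_]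
  · simp [pvKeys, pvCnt, PySem.Dict.empty]
  · simp only [List.map_id_fun', id]
    exact ((pvPyRange_pairwise _ _).sublist List.filter_sublist).nodup

theorem pvKeys_pairwise (temp : List Int) : (pvKeys temp).Pairwise (· < ·) :=
  (pvPyRange_pairwise _ _).sublist List.filter_sublist

theorem pvCnt_mem_keys (temp : List Int) (j : Int) (hj : j ∈ pvKeys temp) : pvCnt temp j ≠ 0 := by
  rw [pvKeys, List.mem_filter] at hj
  simpa using hj.2

theorem pvKeys_mem_iff (temp : List Int) (hne : temp ≠ []) (j : Int) :
    j ∈ pvKeys temp ↔ j ∈ temp ∧ 0 < j := by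
  obtain ⟨x, t, rfl⟩ := List.exists_cons_of_ne_nil hne
  rw [pvKeys, List.mem_filter, PySem.List.mem_pyRange_one]
  constructor
  · rintro ⟨⟨h1, _⟩, h2⟩
    simp only [decide_eq_true_eq] at h2
    refine ⟨?_, by omega⟩
    have : List.count j (x :: t) ≠ 0 := by
      intro h; apply h2; simp [pvCnt, PySem.List.count, h]
    rwa [← List.count_pos_iff, Nat.pos_iff_ne_zero]
  · rintro ⟨h1, h2⟩
    have hmax : (PySem.List.max? (x :: t) (fun y => y)).getD 0 = t.foldl max x := by
      rw [PySem.List.max?_id_cons]; rfl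
    have hle : j ≤ t.foldl max x :=
      PySem.List.max?_isMax (by rw [PySem.List.max?_id_cons]) j h1
    refine ⟨⟨by omega, by omega⟩, ?_⟩
    simp only [decide_eq_true_eq, pvCnt, PySem.List.count]
    have : 0 < List.count j (x :: t) := List.count_pos_iff.mpr h1
    intro hcontra
    omega

-- per-row equality
theorem pvRow_eq (temp : List Int) (hne : temp ≠ []) : pvA_row temp = pvB_row temp := by
  have hitems := pvInfo_items temp
  have hik : ((PySem.List.pyRange 1 (((PySem.List.max? temp (fun x => x)).getD 0) + 1)).foldl
      (fun d j =>
        if ((PySem.List.count temp j : Int)) ≠ 0 then d.insert j ((PySem.List.count temp j : Int)) else d)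
      PySem.Dict.empty).keys = pvKeys temp := by
    show (((PySem.List.pyRange 1 (((PySem.List.max? temp (fun x => x)).getD 0) + 1)).foldl
      (fun d j =>
        if ((PySem.List.count temp j : Int)) ≠ 0 then d.insert j ((PySem.List.count temp j : Int)) else d)
      PySem.Dict.empty).items).map Prod.fst = pvKeys temp
    rw [hitems, List.map_map]
    simp [Function.comp_def]
  have hnodk := hik ▸ (pvKeys_pairwise temp).nodup
  have hgetD : ∀ j ∈ pvKeys temp,
      ((PySem.List.pyRange 1 (((PySem.List.max? temp (fun x => x)).getD 0) + 1)).foldl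
        (fun d j =>
          if ((PySem.List.count temp j : Int)) ≠ 0 then d.insert j ((PySem.List.count temp j : Int)) else d)
        PySem.Dict.empty).getD j 0 = pvCnt temp j := by
    intro j hj
    exact PySem.Dict.getD_of_mem_items _ (by rw [hitems, List.mem_map]; exact ⟨j, hj, rfl⟩) hnodk _
  have hsize : ((PySem.Dict.size ((PySem.List.pyRange 1 (((PySem.List.max? temp (fun x => x)).getD 0) + 1)).foldl
      (fun d j =>
        if ((PySem.List.count temp j : Int)) ≠ 0 then d.insert j ((PySem.List.count temp j : Int)) else d)
      PySem.Dict.empty) : Nat) : Int)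
      = (((pvKeys temp).countP (fun j => decide ((1:Int) ≤ pvCnt temp j)) : Nat) : Int) := by
    have hcl : (pvKeys temp).countP (fun j => decide ((1:Int) ≤ pvCnt temp j)) = (pvKeys temp).length := by
      apply List.countP_eq_length.mpr
      intro j hj
      have h1 := pvCnt_mem_keys temp j hj
      have h2 : 0 ≤ pvCnt temp j := by simp [pvCnt]
      simp only [decide_eq_true_eq]
      omega
    rw [hcl]
    show ((_ : PySem.Dict Int Int).items.length : Int) = _
    rw [hitems, List.length_map]
  have hA : pvA_row temp
      = (pvBlocks (pvCnt temp) (pvKeys temp) (temp.length + 1) 1).flatMap (fun kv => [kv.1, kv.2]) := by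
    show pvA_while _ (temp.length + 1) _ 1 [] = _
    rw [pvA_while_eq _ (pvKeys temp) (pvCnt temp) hik hgetD (temp.length + 1) 1 [] _ hsize]
    rfl
  have hdict : temp.foldl
      (fun (d : PySem.Dict Int Int) x => if 0 < x then d.insert x (d.getD x 0 + 1) else d)
      PySem.Dict.empty = PySem.Dict.counter (temp.filter (fun x => decide ((0:Int) < x))) := by
    rw [PySem.List.foldl_ite_eq_foldl_filter (fun x => (0:Int) < x)
      (fun (d : PySem.Dict Int Int) x => d.insert x (d.getD x 0 + 1))]
    rw [PySem.Dict.foldl_insert_getD_add_one_eq_counter]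
  have hitemsB : (PySem.Dict.counter (temp.filter (fun x => decide ((0:Int) < x)))).items
      = (PySem.Set.ofList (temp.filter (fun x => decide ((0:Int) < x)))).map (fun k => (k, pvCnt temp k)) := by
    rw [PySem.Dict.items_counter]
    apply List.map_congr_left
    intro k hk
    rw [PySem.Set.mem_ofList] at hk
    have hk0 : (0:Int) < k := by
      rw [List.mem_filter] at hk; simpa using hk.2
    have hcf : List.count k (temp.filter (fun x => decide ((0:Int) < x))) = List.count k temp :=
      List.count_filter (by simpa using hk0)
    rw [hcf]; rfl
  have hperm : (pvBlocks (pvCnt temp) (pvKeys temp) (temp.length + 1) 1).Perm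
      ((PySem.Set.ofList (temp.filter (fun x => decide ((0:Int) < x)))).map (fun k => (k, pvCnt temp k))) := by
    refine List.Perm.trans (pvBlocks_perm (pvCnt temp) (temp.length + 1) 1 (pvKeys temp) ?_) ?_
    · intro j hj
      have h1 := pvCnt_mem_keys temp j hj
      have h2 : 0 ≤ pvCnt temp j := by simp [pvCnt]
      have h3 : pvCnt temp j ≤ (temp.length : Int) := by
        simp only [pvCnt, PySem.List.count]
        exact_mod_cast List.count_le_length
      constructor
      · omega
      · push_cast; omega
    · apply List.Perm.map
      rw [List.perm_ext_iff_of_nodup (pvKeys_pairwise temp).nodup (PySem.Set.nodup_ofList _)]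
      intro j
      rw [pvKeys_mem_iff temp hne j, PySem.Set.mem_ofList, List.mem_filter]
      simp
  have hsorted : PySem.List.sorted
      ((PySem.Set.ofList (temp.filter (fun x => decide ((0:Int) < x)))).map (fun k => (k, pvCnt temp k)))
      (fun kv => toLex (kv.2, kv.1)) = pvBlocks (pvCnt temp) (pvKeys temp) (temp.length + 1) 1 := by
    apply PySem.List.sorted_eq_of_perm_of_pairwise_lt
    · exact hperm
    · exact pvBlocks_pairwise (pvCnt temp) (pvKeys temp) (pvKeys_pairwise temp) (temp.length + 1) 1
  show pvA_row temp =
    (PySem.List.sorted (temp.foldl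
      (fun (d : PySem.Dict Int Int) x => if 0 < x then d.insert x (d.getD x 0 + 1) else d)
      PySem.Dict.empty).items (fun kv => toLex (kv.2, kv.1))).foldl
      (fun flat kv => flat ++ [kv.1, kv.2]) []
  rw [hdict, hitemsB, hsorted,
    PySem.List.foldl_append_eq_flatMap (fun kv : Int × Int => [kv.1, kv.2])
      (pvBlocks (pvCnt temp) (pvKeys temp) (temp.length + 1) 1) []]
  rw [hA]
  rfl

theorem pvPad_loop (max_row : Int) :
    ∀ (fuel : Nat) (r : List Int), 0 < fuel → (r.length : Int) + fuel = max_row →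
      pvA_pad max_row fuel r = r ++ List.replicate fuel 0 := by
  intro fuel
  induction fuel with
  | zero => intro r h _; omega
  | succ fuel ih =>
    intro r _ hlen
    rw [pvA_pad]
    by_cases hf : fuel = 0
    · subst hf
      have hc : (((r ++ [0]).length : Int)) = max_row := by
        simp only [List.length_append, List.length_cons, List.length_nil]
        push_cast at hlen ⊢
        omega
      rw [if_pos hc]
      rfl
    · have hc : ¬ ((((r ++ [0]).length : Int)) = max_row) := by
        simp only [List.length_append, List.length_cons, List.length_nil]
        push_cast at hlen ⊢
        omega
      rw [if_neg hc]
      have hlen2 : (((r ++ [0]).length : Int)) + (fuel : Int) = max_row := by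
        simp only [List.length_append, List.length_cons, List.length_nil]
        push_cast at hlen ⊢
        omega
      rw [ih (r ++ [0]) (by omega) hlen2]
      rw [List.append_assoc]
      congr 1

-- padding equality (any row, any target)
theorem pvPad_eq (max_row : Int) (r : List Int) :
    (if (r.length : Int) < max_row then pvA_pad max_row (max_row - (r.length : Int)).toNat r else r)
      = r ++ List.replicate (max_row - (r.length : Int)).toNat 0 := by
  by_cases h : (r.length : Int) < max_row
  · simp only [h, if_true]
    apply pvPad_loop
    · omega
    · rw [Int.toNat_of_nonneg (by omega)]
      omega
  · have : (max_row - (r.length : Int)).toNat = 0 := by omega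
    simp [h, this]

theorem pvFold_split (arr : List (List Int)) :
    arr.foldl
      (fun (st : List (List Int) × Int) temp =>
        let temp_list := pvA_row temp
        (st.1 ++ [temp_list], max st.2 ((temp_list.length : Int)))) ([], 0)
    = (arr.map pvA_row, arr.foldl (fun m temp => max m (((pvA_row temp).length : Int))) 0) := by
  rw [show (fun (st : List (List Int) × Int) temp =>
        let temp_list := pvA_row temp
        (st.1 ++ [temp_list], max st.2 ((temp_list.length : Int))))
      = (fun (st : List (List Int) × Int) temp =>
        ((fun (l : List (List Int)) temp => l ++ [pvA_row temp]) st.1 temp,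
         (fun (m : Int) temp => max m (((pvA_row temp).length : Int))) st.2 temp)) from rfl]
  rw [PySem.List.foldl_prod_mk
    (fun (l : List (List Int)) temp => l ++ [pvA_row temp])
    (fun (m : Int) temp => max m (((pvA_row temp).length : Int))) arr [] 0]
  rw [PySem.List.foldl_append_singleton_eq_map pvA_row arr []]
  rfl

theorem pvMax_eq (rows : List (List Int)) :
    PySem.List.maxD (rows.map (fun r => ((r.length : Int)))) (fun x => x) 0
      = rows.foldl (fun m r => max m ((r.length : Int))) 0 := by
  cases rows with
  | nil => rfl
  | cons r t =>
    show (PySem.List.max? (((r.length : Int)) :: t.map (fun r => ((r.length : Int)))) (fun x => x)).getD 0 = _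
    rw [PySem.List.max?_id_cons]
    show (t.map (fun r => ((r.length : Int)))).foldl max ((r.length : Int)) = _
    rw [List.foldl_map, List.foldl_cons]
    have h0 : max (0:Int) ((r.length : Int)) = ((r.length : Int)) := by omega
    rw [h0]

-- ===== VERDICT (by name: the statement is the Claim_ definition above) =====
theorem calc_R_spec : Claim_equal_calc_R := by
  intro arr _ hpre
  show calc_R arr = calc_R_alt arr
  unfold calc_R calc_R_alt
  rw [pvFold_split arr]
  have hrows : arr.map pvA_row = arr.map pvB_row :=
    List.map_congr_left (fun t ht => pvRow_eq t (hpre t ht))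
  have hmaxs : arr.foldl (fun m temp => max m (((pvA_row temp).length : Int))) 0
      = (arr.map pvB_row).foldl (fun m r => max m ((r.length : Int))) 0 := by
    rw [List.foldl_map]
    apply PySem.List.foldl_congr_mem
    intro acc t ht
    rw [pvRow_eq t (hpre t ht)]
  simp only []
  rw [hrows, hmaxs, pvMax_eq (arr.map pvB_row)]
  apply List.map_congr_left
  intro r _
  exact pvPad_eq _ r
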